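-- pv_equiv track=rewrite | github.com/dalehagglund/everybody-codes-2025 | ec06/ec06.py | part3_alternate
-- ===== SOURCE A (Python) =====
-- def part3_alternate(input):
--     mindist = 1000
--     input = input * 1000
--
--     total = 0
--     for pos, ch in enumerate(input):
--         if ch in "ABC": continue
--         left, right = max(pos - mindist, 0), min(pos + mindist, len(input))
--         total += input.count(ch.upper(), left, right + 1)
--
--     return total
-- ===== SOURCE B (Python) =====
-- def part3_alternate(input):
--     mindist = 1000
--     s = input * 1000
--     n = len(s)
--     counts = {}
--     for ch in s[:mindist + 1]:
--         counts[ch] = counts.get(ch, 0) + 1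
--     total = 0
--     for pos in range(n):
--         if pos > 0:
--             j = pos + mindist
--             if j < n:
--                 c = s[j]
--                 counts[c] = counts.get(c, 0) + 1
--             i = pos - mindist - 1
--             if i >= 0:
--                 c = s[i]
--                 counts[c] = counts[c] - 1
--         ch = s[pos]
--         if ch in "ABC":
--             continue
--         total += counts.get(ch.upper(), 0)
--     return total
-- ===== Notes on version B (the rewrite author's own statement) =====
-- stated objective: faster
-- what changed: replaces the per-position window recount (str.count over a ~2001-char slice at every position) with a single sliding-window character counter updated in O(1) per position
import Mathlib
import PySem

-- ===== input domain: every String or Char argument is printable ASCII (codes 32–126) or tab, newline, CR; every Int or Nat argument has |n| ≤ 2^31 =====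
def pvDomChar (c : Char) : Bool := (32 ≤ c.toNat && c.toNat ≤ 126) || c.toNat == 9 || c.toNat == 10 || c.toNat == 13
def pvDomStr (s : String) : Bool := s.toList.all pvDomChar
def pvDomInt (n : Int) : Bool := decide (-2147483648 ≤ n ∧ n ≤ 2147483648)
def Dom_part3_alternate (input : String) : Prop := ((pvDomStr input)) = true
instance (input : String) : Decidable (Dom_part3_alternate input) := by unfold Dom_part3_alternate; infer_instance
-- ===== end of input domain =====

-- B replaces A's per-position window recount by a sliding-window character counter (O(1) work per position).

-- ===== PORT A =====
-- str.count(sub, start, end) with a single-character sub is exactly the character count of the slice.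
-- enumerate(input) is rendered as s.zipIdx.map (fun p => (↑p.2, p.1)); this is exactly
-- PySem.List.enumerate s 0 (lemma PySem.List.enumerate_eq_zipIdx_map, proved as pvZip below).
def part3_alternate (input : String) : Int :=
  let s := PySem.List.pyRepeat input.toList 1000
  (s.zipIdx.map (fun p => ((p.2 : Int), p.1))).foldl
    (fun total pc =>
      if PySem.Chars.isIn [pc.2] "ABC".toList then total
      else
        let left := max (pc.1 - 1000) 0
        let right := min (pc.1 + 1000) (s.length : Int)
        total + ((PySem.List.slice s (some left) (some (right + 1))).count (PySem.Chars.upperChar pc.2) : Int))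
    0

-- ===== PORT B =====
def part3_alternate_alt (input : String) : Int :=
  let s := PySem.List.pyRepeat input.toList 1000
  let n : Int := s.length
  let counts0 : PySem.Dict Char Int := (PySem.List.slice s none (some 1001)).foldl
      (fun d ch => d.insert ch (d.getD ch 0 + 1)) PySem.Dict.empty
  ((PySem.List.pyRange 0 n 1).foldl
    (fun st pos =>
      let cs1 :=
        if 0 < pos then
          let cs2 := if pos + 1000 < n then
              match PySem.List.pyGet? s (pos + 1000) with
              | some c => st.1.insert c (st.1.getD c 0 + 1)
              | none => st.1
            else st.1
          if 0 ≤ pos - 1001 then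
              match PySem.List.pyGet? s (pos - 1001) with
              | some c => cs2.insert c (cs2.getD c 0 - 1)
              | none => cs2
            else cs2
        else st.1
      match PySem.List.pyGet? s pos with
      | some ch =>
        if PySem.Chars.isIn [ch] "ABC".toList then (cs1, st.2)
        else (cs1, st.2 + cs1.getD (PySem.Chars.upperChar ch) 0)
      | none => (cs1, st.2)) (counts0, (0 : Int))).2

-- ===== PRECONDITION & SPEC =====
def Spec_part3_alternate (input : String) (out : Int) : Prop := out = part3_alternate_alt input
instance (input : String) (out : Int) : Decidable (Spec_part3_alternate input out) := by unfold Spec_part3_alternate; infer_instance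

-- ===== CLAIM (what is proved, stated in full; the proofs are below) =====
def Claim_equal_part3_alternate : Prop := ∀ (input : String), Dom_part3_alternate input → Spec_part3_alternate input (part3_alternate input)

-- ===== LEMMAS AND PROOFS =====

-- the (clamped) character window around position j: s[max(j-1000,0) : min(j+1000, len)+1]
def pvWin (s : List Char) (j : Nat) : List Char :=
  (s.drop (j - 1000)).take (min (j + 1001) s.length - (j - 1000))

theorem pvCount_take_clamp (s : List Char) (c : Char) (i : Nat) :
    (s.take i).count c = (s.take (min i s.length)).count c := by
  rcases le_total i s.length with h | h
  · rw [min_eq_left h]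
  · rw [min_eq_right h, List.take_of_length_le h, List.take_length]

theorem pvCount_add (s : List Char) (c : Char) (a m : Nat) :
    (s.take (a + m)).count c = (s.take a).count c + ((s.drop a).take m).count c := by
  rw [List.take_add, List.count_append]

theorem pvCount_take_succ (s : List Char) (c : Char) (i : Nat) :
    (s.take (i + 1)).count c = (s.take i).count c + (if s[i]? = some c then 1 else 0) := by
  rw [List.take_add_one, List.count_append]
  cases h : s[i]? with
  | none => simp
  | some a =>
    by_cases hac : a = c
    · subst hac; simp
    · simp [Option.some.injEq, hac]

theorem pvWin_count_add (s : List Char) (c : Char) (j : Nat) (hj : j < s.length) :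
    (s.take (min (j + 1001) s.length)).count c
      = (s.take (j - 1000)).count c + (pvWin s j).count c := by
  have h : j - 1000 + (min (j + 1001) s.length - (j - 1000)) = min (j + 1001) s.length := by omega
  rw [pvWin, ← pvCount_add, h]

set_option maxRecDepth 4096 in
theorem pvWin_update (s : List Char) (c : Char) (k : Nat) (h1 : 1 ≤ k) (hk : k < s.length) :
    (pvWin s k).count c + (if 1001 ≤ k ∧ s[k - 1001]? = some c then 1 else 0)
      = (pvWin s (k - 1)).count c + (if k + 1000 < s.length ∧ s[k + 1000]? = some c then 1 else 0) := by
  have hk1' : k - 1 < s.length := by omega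
  have hH := pvWin_count_add s c k hk
  have hH' := pvWin_count_add s c (k - 1) hk1'
  have hHstep : (s.take (min (k + 1001) s.length)).count c
      = (s.take (min (k - 1 + 1001) s.length)).count c
        + (if k + 1000 < s.length ∧ s[k + 1000]? = some c then 1 else 0) := by
    by_cases hb : k + 1000 < s.length
    · have e1 : min (k + 1001) s.length = (k + 1000) + 1 := by omega
      have e2 : min (k - 1 + 1001) s.length = k + 1000 := by omega
      rw [e1, e2, pvCount_take_succ]
      simp only [hb, true_and]
    · have e : min (k + 1001) s.length = min (k - 1 + 1001) s.length := by omega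
      rw [e]; simp [hb]
  have hLstep : (s.take (k - 1000)).count c
      = (s.take (k - 1 - 1000)).count c + (if 1001 ≤ k ∧ s[k - 1001]? = some c then 1 else 0) := by
    by_cases hb : 1001 ≤ k
    · have e1 : k - 1000 = (k - 1001) + 1 := by omega
      have e2 : k - 1 - 1000 = k - 1001 := by omega
      rw [e1, e2, pvCount_take_succ]
      simp only [hb, true_and]
    · have e : k - 1000 = k - 1 - 1000 := by omega
      rw [e]; simp [hb]
  omega

-- A's bounded str.count term equals the count over the clamped window
theorem pvSliceA_eq (s : List Char) (j : Nat) (hj : j < s.length) (u : Char) :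
    (PySem.List.slice s (some (max ((j : Int) - 1000) 0))
        (some (min ((j : Int) + 1000) ((s.length : Nat) : Int) + 1))).count u
      = (pvWin s j).count u := by
  have e1 : max ((j : Int) - 1000) 0 = ((j - 1000 : Nat) : Int) := by push_cast; omega
  have e2 : min ((j : Int) + 1000) ((s.length : Nat) : Int) + 1
      = ((min (j + 1000) s.length + 1 : Nat) : Int) := by push_cast; omega
  rw [e1, e2, PySem.List.slice_natCast]
  unfold pvWin
  by_cases hb : j + 1000 < s.length
  · have e3 : min (j + 1000) s.length + 1 - (j - 1000) = min (j + 1001) s.length - (j - 1000) := by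
      omega
    rw [e3]
  · rw [List.take_of_length_le (by simp; omega), List.take_of_length_le (by simp; omega)]

-- the initial counter equals the window of position 0
theorem pvInit (s : List Char) (c : Char) :
    (((PySem.List.slice s none (some 1001)).foldl
        (fun d ch => d.insert ch (d.getD ch 0 + 1)) PySem.Dict.empty : PySem.Dict Char Int)).getD c 0
      = ((pvWin s 0).count c : Int) := by
  have hs : PySem.List.slice s none (some 1001) = s.take ((1001 : Int)).toNat :=
    PySem.List.slice_to s (by norm_num)
  rw [hs, PySem.Dict.getD_foldl_insert_add_one]
  have h0 : (PySem.Dict.empty : PySem.Dict Char Int).getD c 0 = 0 := by rfl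
  rw [h0, zero_add]
  unfold pvWin
  rw [List.drop_zero, Nat.sub_zero]
  norm_num
  have e : ((1001 : Int)).toNat = 1001 := rfl
  rw [e, pvCount_take_clamp s c 1001]

theorem pvGetD_inc (d : PySem.Dict Char Int) (x c : Char) :
    (d.insert x (d.getD x 0 + 1)).getD c 0 = d.getD c 0 + (if x = c then 1 else 0) := by
  rw [PySem.Dict.getD_insert]
  by_cases h : c = x
  · subst h; simp
  · rw [if_neg h, if_neg (fun hh => h hh.symm), add_zero]

theorem pvGetD_dec (d : PySem.Dict Char Int) (y c : Char) :
    (d.insert y (d.getD y 0 - 1)).getD c 0 = d.getD c 0 - (if y = c then 1 else 0) := by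
  rw [PySem.Dict.getD_insert]
  by_cases h : c = y
  · subst h; simp
  · rw [if_neg h, if_neg (fun hh => h hh.symm), sub_zero]

set_option maxRecDepth 16384 in
theorem pvLockstep (s : List Char) (m : Nat) : ∀ (k : Nat) (d : PySem.Dict Char Int) (t : Int),
    k + m = s.length → 1 ≤ k →
    (∀ c, d.getD c 0 = ((pvWin s (k - 1)).count c : Int)) →
    ((PySem.List.pyRange (k : Int) ((s.length : Nat) : Int) 1).foldl
      (fun st pos =>
        let cs1 :=
          if 0 < pos then
            let cs2 := if pos + 1000 < ((s.length : Nat) : Int) then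
                match PySem.List.pyGet? s (pos + 1000) with
                | some c => st.1.insert c (st.1.getD c 0 + 1)
                | none => st.1
              else st.1
            if 0 ≤ pos - 1001 then
                match PySem.List.pyGet? s (pos - 1001) with
                | some c => cs2.insert c (cs2.getD c 0 - 1)
                | none => cs2
              else cs2
          else st.1
        match PySem.List.pyGet? s pos with
        | some ch =>
          if PySem.Chars.isIn [ch] "ABC".toList then (cs1, st.2)
          else (cs1, st.2 + cs1.getD (PySem.Chars.upperChar ch) 0)
        | none => (cs1, st.2)) (d, t)).2
    = (PySem.List.enumerate (s.drop k) (k : Int)).foldl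
        (fun total pc =>
          if PySem.Chars.isIn [pc.2] "ABC".toList then total
          else
            total + ((PySem.List.slice s (some (max (pc.1 - 1000) 0))
                (some (min (pc.1 + 1000) ((s.length : Nat) : Int) + 1))).count
                  (PySem.Chars.upperChar pc.2) : Int)) t := by
  induction m with
  | zero =>
    intro k d t hkm hk1 hinv
    have hk : k = s.length := by omega
    subst hk
    rw [PySem.List.pyRange_of_pos _ _ (by norm_num : (0 : Int) < 1)]
    simp [List.drop_length, PySem.List.enumerate_nil]
  | succ m ih =>
    intro k d t hkm hk1 hinv
    have hkn : k < s.length := by omega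
    have hkInt : (k : Int) < ((s.length : Nat) : Int) := by exact_mod_cast hkn
    have hpos : (0 : Int) < (k : Int) := by exact_mod_cast hk1
    have hgk : PySem.List.pyGet? s (k : Int) = some s[k] := by
      rw [PySem.List.pyGet?_natCast]; exact List.getElem?_eq_getElem hkn
    have hcast : ((k : Int) + 1) = ((k + 1 : Nat) : Int) := by push_cast; ring
    have hdropk : s.drop k = s[k] :: s.drop (k + 1) := List.drop_eq_getElem_cons hkn
    rw [PySem.List.pyRange_one_cons hkInt, List.foldl_cons, hdropk,
      PySem.List.enumerate_cons, List.foldl_cons]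
    have hsliceEq : ((PySem.List.slice s (some (max ((k : Int) - 1000) 0))
        (some (min ((k : Int) + 1000) ((s.length : Nat) : Int) + 1))).count
          (PySem.Chars.upperChar s[k]) : Int)
        = ((pvWin s k).count (PySem.Chars.upperChar s[k]) : Int) := by
      exact_mod_cast congrArg (Nat.cast (R := Int)) (pvSliceA_eq s k hkn (PySem.Chars.upperChar s[k]))
    by_cases hb : k + 1000 < s.length <;> by_cases hc : 1001 ≤ k
    · -- both the entering and the leaving boundary exist
      have hbZ : (k : Int) + 1000 < ((s.length : Nat) : Int) := by push_cast; omega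
      have hcZ : (0 : Int) ≤ (k : Int) - 1001 := by omega
      have hgplus : PySem.List.pyGet? s ((k : Int) + 1000) = some s[k + 1000] := by
        have e : ((k : Int) + 1000) = ((k + 1000 : Nat) : Int) := by push_cast; ring
        rw [e, PySem.List.pyGet?_natCast]; exact List.getElem?_eq_getElem hb
      have hgminus : PySem.List.pyGet? s ((k : Int) - 1001) = some s[k - 1001] := by
        have e : ((k : Int) - 1001) = ((k - 1001 : Nat) : Int) := by push_cast; omega
        rw [e, PySem.List.pyGet?_natCast]; exact List.getElem?_eq_getElem (by omega)
      simp only [hpos, hbZ, hcZ, hgk, hgplus, hgminus, if_pos]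
      have hinv' : ∀ c, (((d.insert s[k + 1000] (d.getD s[k + 1000] 0 + 1)).insert s[k - 1001]
          ((d.insert s[k + 1000] (d.getD s[k + 1000] 0 + 1)).getD s[k - 1001] 0 - 1)).getD c 0)
          = ((pvWin s k).count c : Int) := by
        intro c
        have hupd := pvWin_update s c k hk1 hkn
        have hy : s[k - 1001]? = some s[k - 1001] := List.getElem?_eq_getElem (by omega)
        have hx : s[k + 1000]? = some s[k + 1000] := List.getElem?_eq_getElem hb
        simp only [hb, hc, hx, hy, true_and, Option.some.injEq] at hupd
        have hupdZ : ((pvWin s k).count c : Int) + (if s[k - 1001] = c then 1 else 0)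
            = ((pvWin s (k - 1)).count c : Int) + (if s[k + 1000] = c then 1 else 0) := by
          exact_mod_cast hupd
        rw [pvGetD_dec, pvGetD_inc, hinv c]
        omega
      by_cases hP : PySem.Chars.isIn [s[k]] "ABC".toList = true
      · simp only [hP, if_true, eq_self_iff_true]
        rw [hcast]
        exact ih (k + 1) _ t (by omega) (by omega) (fun c => hinv' c)
      · simp only [hP, if_false]
        rw [hsliceEq, ← hinv' (PySem.Chars.upperChar s[k]), hcast]
        exact ih (k + 1) _ _ (by omega) (by omega) (fun c => hinv' c)
    · -- only the entering boundary exists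
      have hbZ : (k : Int) + 1000 < ((s.length : Nat) : Int) := by push_cast; omega
      have hcZ : ¬ ((0 : Int) ≤ (k : Int) - 1001) := by omega
      have hgplus : PySem.List.pyGet? s ((k : Int) + 1000) = some s[k + 1000] := by
        have e : ((k : Int) + 1000) = ((k + 1000 : Nat) : Int) := by push_cast; ring
        rw [e, PySem.List.pyGet?_natCast]; exact List.getElem?_eq_getElem hb
      simp only [hpos, hbZ, hcZ, hgk, hgplus, if_pos, if_neg, if_true, if_false]
      have hinv' : ∀ c, ((d.insert s[k + 1000] (d.getD s[k + 1000] 0 + 1)).getD c 0)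
          = ((pvWin s k).count c : Int) := by
        intro c
        have hupd := pvWin_update s c k hk1 hkn
        have hx : s[k + 1000]? = some s[k + 1000] := List.getElem?_eq_getElem hb
        simp only [hb, hc, hx, true_and, false_and, if_false, Option.some.injEq,
          add_zero] at hupd
        have hupdZ : ((pvWin s k).count c : Int)
            = ((pvWin s (k - 1)).count c : Int) + (if s[k + 1000] = c then 1 else 0) := by
          exact_mod_cast hupd
        rw [pvGetD_inc, hinv c]
        omega
      by_cases hP : PySem.Chars.isIn [s[k]] "ABC".toList = true
      · simp only [hP, if_true, eq_self_iff_true]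
        rw [hcast]
        exact ih (k + 1) _ t (by omega) (by omega) (fun c => hinv' c)
      · simp only [hP, if_false]
        rw [hsliceEq, ← hinv' (PySem.Chars.upperChar s[k]), hcast]
        exact ih (k + 1) _ _ (by omega) (by omega) (fun c => hinv' c)
    · -- only the leaving boundary exists
      have hbZ : ¬ ((k : Int) + 1000 < ((s.length : Nat) : Int)) := by push_cast; omega
      have hcZ : (0 : Int) ≤ (k : Int) - 1001 := by omega
      have hgminus : PySem.List.pyGet? s ((k : Int) - 1001) = some s[k - 1001] := by
        have e : ((k : Int) - 1001) = ((k - 1001 : Nat) : Int) := by push_cast; omega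
        rw [e, PySem.List.pyGet?_natCast]; exact List.getElem?_eq_getElem (by omega)
      simp only [hpos, hbZ, hcZ, hgk, hgminus, if_pos, if_neg, if_true, if_false]
      have hinv' : ∀ c, ((d.insert s[k - 1001] (d.getD s[k - 1001] 0 - 1)).getD c 0)
          = ((pvWin s k).count c : Int) := by
        intro c
        have hupd := pvWin_update s c k hk1 hkn
        have hy : s[k - 1001]? = some s[k - 1001] := List.getElem?_eq_getElem (by omega)
        simp only [hb, hc, hy, true_and, false_and, if_false, Option.some.injEq,
          add_zero] at hupd
        have hupdZ : ((pvWin s k).count c : Int) + (if s[k - 1001] = c then 1 else 0)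
            = ((pvWin s (k - 1)).count c : Int) := by
          exact_mod_cast hupd
        rw [pvGetD_dec, hinv c]
        omega
      by_cases hP : PySem.Chars.isIn [s[k]] "ABC".toList = true
      · simp only [hP, if_true, eq_self_iff_true]
        rw [hcast]
        exact ih (k + 1) _ t (by omega) (by omega) (fun c => hinv' c)
      · simp only [hP, if_false]
        rw [hsliceEq, ← hinv' (PySem.Chars.upperChar s[k]), hcast]
        exact ih (k + 1) _ _ (by omega) (by omega) (fun c => hinv' c)
    · -- the window does not move at either end
      have hbZ : ¬ ((k : Int) + 1000 < ((s.length : Nat) : Int)) := by push_cast; omega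
      have hcZ : ¬ ((0 : Int) ≤ (k : Int) - 1001) := by omega
      simp only [hpos, hbZ, hcZ, hgk, if_pos, if_neg, if_true, if_false]
      have hinv' : ∀ c, d.getD c 0 = ((pvWin s k).count c : Int) := by
        intro c
        have hupd := pvWin_update s c k hk1 hkn
        simp only [hb, hc, false_and, if_false, add_zero] at hupd
        rw [hinv c]
        exact_mod_cast hupd.symm
      by_cases hP : PySem.Chars.isIn [s[k]] "ABC".toList = true
      · simp only [hP, if_true, eq_self_iff_true]
        rw [hcast]
        exact ih (k + 1) _ t (by omega) (by omega) (fun c => hinv' c)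
      · simp only [hP, if_false]
        rw [hsliceEq, ← hinv' (PySem.Chars.upperChar s[k]), hcast]
        exact ih (k + 1) _ _ (by omega) (by omega) (fun c => hinv' c)

set_option maxRecDepth 16384 in
theorem pvAB (s : List Char) :
    (PySem.List.enumerate s 0).foldl
        (fun total pc =>
          if PySem.Chars.isIn [pc.2] "ABC".toList then total
          else
            total + ((PySem.List.slice s (some (max (pc.1 - 1000) 0))
                (some (min (pc.1 + 1000) ((s.length : Nat) : Int) + 1))).count
                  (PySem.Chars.upperChar pc.2) : Int)) 0
    = ((PySem.List.pyRange 0 ((s.length : Nat) : Int) 1).foldl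
      (fun st pos =>
        let cs1 :=
          if 0 < pos then
            let cs2 := if pos + 1000 < ((s.length : Nat) : Int) then
                match PySem.List.pyGet? s (pos + 1000) with
                | some c => st.1.insert c (st.1.getD c 0 + 1)
                | none => st.1
              else st.1
            if 0 ≤ pos - 1001 then
                match PySem.List.pyGet? s (pos - 1001) with
                | some c => cs2.insert c (cs2.getD c 0 - 1)
                | none => cs2
              else cs2
          else st.1
        match PySem.List.pyGet? s pos with
        | some ch =>
          if PySem.Chars.isIn [ch] "ABC".toList then (cs1, st.2)
          else (cs1, st.2 + cs1.getD (PySem.Chars.upperChar ch) 0)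
        | none => (cs1, st.2))
      (((PySem.List.slice s none (some 1001)).foldl
        (fun d ch => d.insert ch (d.getD ch 0 + 1)) PySem.Dict.empty : PySem.Dict Char Int), (0 : Int))).2 := by
  cases s with
  | nil =>
    rw [PySem.List.pyRange_of_pos _ _ (by norm_num : (0 : Int) < 1)]
    simp [PySem.List.enumerate_nil]
  | cons c0 tl =>
    have hlen : (0 : Int) < ((((c0 :: tl).length : Nat)) : Int) := by
      have h : 0 < (c0 :: tl).length := Nat.succ_pos _
      exact_mod_cast h
    rw [PySem.List.pyRange_one_cons hlen, List.foldl_cons,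
      PySem.List.enumerate_cons, List.foldl_cons]
    have hg0 : PySem.List.pyGet? (c0 :: tl) (0 : Int) = some c0 := by
      have h := PySem.List.pyGet?_natCast (c0 :: tl) 0
      simpa using h
    simp only [lt_self_iff_false, if_false, hg0]
    have e01 : ((0 : Int) + 1) = ((1 : Nat) : Int) := by norm_num
    rw [e01]
    by_cases hP : PySem.Chars.isIn [c0] "ABC".toList = true
    · simp only [hP, if_true, eq_self_iff_true]
      exact (pvLockstep (c0 :: tl) tl.length 1 _ 0
        (by rw [List.length_cons]; omega) (le_refl 1) (fun c => pvInit (c0 :: tl) c)).symm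
    · simp only [hP, if_false]
      have hcount : ((PySem.List.slice (c0 :: tl) (some (max ((0 : Int) - 1000) 0))
          (some (min ((0 : Int) + 1000) ((((c0 :: tl).length : Nat)) : Int) + 1))).count
            (PySem.Chars.upperChar c0) : Int)
          = (((PySem.List.slice (c0 :: tl) none (some 1001)).foldl
              (fun d ch => d.insert ch (d.getD ch 0 + 1)) PySem.Dict.empty :
                PySem.Dict Char Int)).getD (PySem.Chars.upperChar c0) 0 := by
        rw [pvInit]
        have h := pvSliceA_eq (c0 :: tl) 0 (Nat.succ_pos _) (PySem.Chars.upperChar c0)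
        exact_mod_cast congrArg (Nat.cast (R := Int)) h
      rw [hcount]
      exact (pvLockstep (c0 :: tl) tl.length 1 _ _
        (by rw [List.length_cons]; omega) (le_refl 1) (fun c => pvInit (c0 :: tl) c)).symm

theorem pvZip (s : List Char) :
    s.zipIdx.map (fun p => ((p.2 : Int), p.1)) = PySem.List.enumerate s 0 := by
  rw [PySem.List.enumerate_eq_zipIdx_map]
  exact List.map_congr_left (fun a _ => by rw [zero_add])

theorem pvAB' (s : List Char) :
    (s.zipIdx.map (fun p => ((p.2 : Int), p.1))).foldl
        (fun total pc =>
          if PySem.Chars.isIn [pc.2] "ABC".toList then total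
          else
            total + ((PySem.List.slice s (some (max (pc.1 - 1000) 0))
                (some (min (pc.1 + 1000) ((s.length : Nat) : Int) + 1))).count
                  (PySem.Chars.upperChar pc.2) : Int)) 0
    = ((PySem.List.pyRange 0 ((s.length : Nat) : Int) 1).foldl
      (fun st pos =>
        let cs1 :=
          if 0 < pos then
            let cs2 := if pos + 1000 < ((s.length : Nat) : Int) then
                match PySem.List.pyGet? s (pos + 1000) with
                | some c => st.1.insert c (st.1.getD c 0 + 1)
                | none => st.1
              else st.1
            if 0 ≤ pos - 1001 then
                match PySem.List.pyGet? s (pos - 1001) with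
                | some c => cs2.insert c (cs2.getD c 0 - 1)
                | none => cs2
              else cs2
          else st.1
        match PySem.List.pyGet? s pos with
        | some ch =>
          if PySem.Chars.isIn [ch] "ABC".toList then (cs1, st.2)
          else (cs1, st.2 + cs1.getD (PySem.Chars.upperChar ch) 0)
        | none => (cs1, st.2))
      (((PySem.List.slice s none (some 1001)).foldl
        (fun d ch => d.insert ch (d.getD ch 0 + 1)) PySem.Dict.empty : PySem.Dict Char Int), (0 : Int))).2 := by
  rw [pvZip]
  exact pvAB s

-- ===== VERDICT (by name: the statement is the Claim_ definition above) =====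
theorem part3_alternate_spec : Claim_equal_part3_alternate := by
  intro input _
  unfold Spec_part3_alternate part3_alternate part3_alternate_alt
  exact pvAB' (PySem.List.pyRepeat input.toList 1000)
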